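-- pv_equiv track=rewrite | github.com/gabe-parrish/ssebop_os | refet_scripts/gridmet_raster_analysis_plotting_II.py | get_common_dates
-- ===== SOURCE A (Python) =====
-- def get_common_dates(drought_dt_lst, nondrought_dt_lst, drought_plist, nondrought_plist):
--     """"""
--
--     drought_common_date_indices = []
--     nondrought_common_date_indices = []
--     common_date_lst = []
--     for i, d in enumerate(drought_dt_lst):
--         for ii, nd in enumerate(nondrought_dt_lst):
--             if d == nd:
--                 drought_common_date_indices.append(i)
--                 nondrought_common_date_indices.append(ii)
--                 common_date_lst.append(nd)
--
--     out_drought = [drought_plist[x] for x in drought_common_date_indices]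
--     out_nondrought = [nondrought_plist[y] for y in nondrought_common_date_indices]
--     return out_drought, out_nondrought, common_date_lst
-- ===== SOURCE B (Python) =====
-- def get_common_dates(drought_dt_lst, nondrought_dt_lst, drought_plist, nondrought_plist):
--     # hash index: nondrought date -> list of its indices (in order), then one pass over drought dates
--     nd_index = {}
--     for ii, nd in enumerate(nondrought_dt_lst):
--         nd_index.setdefault(nd, []).append(ii)
--     out_drought = []
--     out_nondrought = []
--     common_date_lst = []
--     for i, d in enumerate(drought_dt_lst):
--         for ii in nd_index.get(d, []):
--             out_drought.append(drought_plist[i])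
--             out_nondrought.append(nondrought_plist[ii])
--             common_date_lst.append(d)
--     return out_drought, out_nondrought, common_date_lst
-- ===== Notes on version B (the rewrite author's own statement) =====
-- stated objective: faster
-- what changed: Replaces the quadratic nested scan over both date lists (plus the two indexing comprehensions) by a hash dict mapping each nondrought date to its index list built in one pass, then a single pass over drought dates emitting the payloads directly; intended as faster (O(n+m+|output|) vs O(n*m)) — a timing run measured B 1.75x at the largest size both finished and A timing out at n=4096, though on duplicate-heavy inputs the output itself has size n*m so B times out there too.
import Mathlib
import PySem

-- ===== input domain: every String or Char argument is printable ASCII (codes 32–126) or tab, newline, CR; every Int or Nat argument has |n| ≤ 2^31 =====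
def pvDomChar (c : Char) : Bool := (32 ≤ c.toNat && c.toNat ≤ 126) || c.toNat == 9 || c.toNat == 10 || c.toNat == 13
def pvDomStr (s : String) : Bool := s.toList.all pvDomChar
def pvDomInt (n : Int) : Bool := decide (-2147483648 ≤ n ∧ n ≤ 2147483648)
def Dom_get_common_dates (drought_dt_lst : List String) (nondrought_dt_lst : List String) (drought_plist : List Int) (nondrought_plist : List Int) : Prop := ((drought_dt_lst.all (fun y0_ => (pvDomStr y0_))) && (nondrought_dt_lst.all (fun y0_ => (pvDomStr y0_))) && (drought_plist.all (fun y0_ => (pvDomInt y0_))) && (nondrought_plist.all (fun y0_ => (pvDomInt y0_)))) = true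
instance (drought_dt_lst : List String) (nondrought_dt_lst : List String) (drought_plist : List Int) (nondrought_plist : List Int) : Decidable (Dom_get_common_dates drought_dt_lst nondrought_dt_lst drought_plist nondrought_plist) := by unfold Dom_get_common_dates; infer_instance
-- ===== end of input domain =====

-- B replaces A's quadratic nested scan by a hash index (nondrought date -> index list)
-- built in one pass, then a single pass over the drought dates; intended as faster
-- (timing: 1.75x at the largest size both versions finished).

-- ===== PORT A =====
-- list indexing drought_plist[x] / nondrought_plist[y] is ported with pyGetD (default 0):
-- exact under Pre_, which excludes exactly the inputs where Python raises IndexError.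
def get_common_dates (drought_dt_lst : List String) (nondrought_dt_lst : List String) (drought_plist : List Int) (nondrought_plist : List Int) : List Int × List Int × List String :=
  let z : List Int × List Int × List String :=
    (PySem.List.enumerate drought_dt_lst 0).foldl (fun acc p =>
      (PySem.List.enumerate nondrought_dt_lst 0).foldl (fun acc2 q =>
        if p.2 == q.2 then (acc2.1 ++ [p.1], acc2.2.1 ++ [q.1], acc2.2.2 ++ [q.2]) else acc2) acc)
      ([], [], [])
  (z.1.map (fun x => PySem.List.pyGetD drought_plist x 0),
   z.2.1.map (fun y => PySem.List.pyGetD nondrought_plist y 0),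
   z.2.2)

-- ===== PORT B =====
-- nd_index.setdefault(nd, []).append(ii) is ported as Dict.modify (d[k] = d.get(k, []) + [ii]),
-- which builds the identical dict; .get(d, []) is Dict.getD.
def get_common_dates_alt (drought_dt_lst : List String) (nondrought_dt_lst : List String) (drought_plist : List Int) (nondrought_plist : List Int) : List Int × List Int × List String :=
  let nd_index : PySem.Dict String (List Int) :=
    (PySem.List.enumerate nondrought_dt_lst 0).foldl
      (fun d q => d.modify q.2 [] (fun v => v ++ [q.1])) PySem.Dict.empty
  (PySem.List.enumerate drought_dt_lst 0).foldl (fun acc p =>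
    (nd_index.getD p.2 []).foldl (fun acc2 ii =>
      (acc2.1 ++ [PySem.List.pyGetD drought_plist p.1 0],
       acc2.2.1 ++ [PySem.List.pyGetD nondrought_plist ii 0],
       acc2.2.2 ++ [p.2])) acc)
    ([], [], [])

-- ===== PRECONDITION & SPEC =====
-- Pre_ excludes exactly the inputs where Python A raises IndexError: a drought index whose
-- date occurs in the nondrought list but is out of range of drought_plist, or a nondrought
-- index whose date occurs in the drought list but is out of range of nondrought_plist.
def Pre_get_common_dates (drought_dt_lst : List String) (nondrought_dt_lst : List String) (drought_plist : List Int) (nondrought_plist : List Int) : Prop :=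
  ((PySem.List.enumerate drought_dt_lst 0).all
      (fun p => !nondrought_dt_lst.contains p.2 || p.1 < drought_plist.length) &&
   (PySem.List.enumerate nondrought_dt_lst 0).all
      (fun q => !drought_dt_lst.contains q.2 || q.1 < nondrought_plist.length)) = true
instance (drought_dt_lst : List String) (nondrought_dt_lst : List String) (drought_plist : List Int) (nondrought_plist : List Int) : Decidable (Pre_get_common_dates drought_dt_lst nondrought_dt_lst drought_plist nondrought_plist) := by unfold Pre_get_common_dates; infer_instance

def pvWitness_get_common_dates : List String × List String × List Int × List Int :=
  (["a", "b"], ["b", "a"], [5, 6], [7, 8])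

def Spec_get_common_dates (drought_dt_lst : List String) (nondrought_dt_lst : List String) (drought_plist : List Int) (nondrought_plist : List Int) (out : List Int × List Int × List String) : Prop := out = get_common_dates_alt drought_dt_lst nondrought_dt_lst drought_plist nondrought_plist
instance (drought_dt_lst : List String) (nondrought_dt_lst : List String) (drought_plist : List Int) (nondrought_plist : List Int) (out : List Int × List Int × List String) : Decidable (Spec_get_common_dates drought_dt_lst nondrought_dt_lst drought_plist nondrought_plist out) := by unfold Spec_get_common_dates; infer_instance

-- ===== CLAIM (what is proved, stated in full; the proofs are below) =====
def Claim_equal_get_common_dates : Prop := ∀ (drought_dt_lst : List String) (nondrought_dt_lst : List String) (drought_plist : List Int) (nondrought_plist : List Int), Dom_get_common_dates drought_dt_lst nondrought_dt_lst drought_plist nondrought_plist → Pre_get_common_dates drought_dt_lst nondrought_dt_lst drought_plist nondrought_plist → Spec_get_common_dates drought_dt_lst nondrought_dt_lst drought_plist nondrought_plist (get_common_dates drought_dt_lst nondrought_dt_lst drought_plist nondrought_plist)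

-- ===== LEMMAS AND PROOFS =====

-- A's inner loop: conditional triple-append over one list (the matched date q.2 equals dv).
theorem innerA_eq (dv : String) (i : Int)
    (l : List (Int × String)) (acc : List Int × List Int × List String) :
    l.foldl (fun acc2 q =>
      if dv == q.2 then (acc2.1 ++ [i], acc2.2.1 ++ [q.1], acc2.2.2 ++ [q.2]) else acc2) acc =
    (acc.1 ++ (l.filter (fun q => dv == q.2)).map (fun _ => i),
     acc.2.1 ++ (l.filter (fun q => dv == q.2)).map (·.1),
     acc.2.2 ++ (l.filter (fun q => dv == q.2)).map (fun _ => dv)) := by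
  induction l generalizing acc with
  | nil => simp
  | cons q t ih =>
    rw [List.foldl_cons, ih, List.filter_cons]
    cases h : dv == q.2
    · simp
    · simp [eq_of_beq h]

-- An outer loop whose step appends componentwise is a flatMap componentwise.
theorem outer_eq {β : Type} (g1 g2 : β → List Int) (g3 : β → List String)
    (l : List β) (acc : List Int × List Int × List String) :
    l.foldl (fun acc p => (acc.1 ++ g1 p, acc.2.1 ++ g2 p, acc.2.2 ++ g3 p)) acc =
    (acc.1 ++ l.flatMap g1, acc.2.1 ++ l.flatMap g2, acc.2.2 ++ l.flatMap g3) := by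
  induction l generalizing acc with
  | nil => simp
  | cons x t ih => rw [List.foldl_cons, ih]; simp

theorem flatMap_singleton_eq_map {α β : Type} (f : α → β) (l : List α) :
    l.flatMap (fun x => [f x]) = l.map f := by
  induction l with
  | nil => rfl
  | cons x t ih => simp [ih]

-- The built dict's lookup is the filtered index list.
theorem getD_build (l : List (Int × String)) (d : PySem.Dict String (List Int)) (c : String) :
    (l.foldl (fun d q => d.modify q.2 [] (fun v => v ++ [q.1])) d).getD c [] =
    d.getD c [] ++ (l.filter (fun q => c == q.2)).map (·.1) := by
  induction l generalizing d with
  | nil => simp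
  | cons q t ih =>
    rw [List.foldl_cons, ih, PySem.Dict.getD_modify, List.filter_cons]
    by_cases h : c = q.2
    · simp [h]
    · simp [h]

-- ===== VERDICT (by name: the statement is the Claim_ definition above) =====
theorem get_common_dates_spec : Claim_equal_get_common_dates := by
  intro dts ndts dpl ndpl _ _
  unfold Spec_get_common_dates get_common_dates get_common_dates_alt
  simp only [innerA_eq, getD_build, PySem.Dict.getD_empty, List.nil_append,
    outer_eq, List.map_flatMap]
  simp [flatMap_singleton_eq_map, Function.comp_def]
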